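-- pv_equiv track=rewrite | github.com/TTyyds-art/MPP_Powersystem | PPOPT_main/PPOPT_main/src/ppopt/mpQCQP_program.py | create_act_index
-- ===== SOURCE A (Python) =====
-- def create_act_index(n_eq, nb, nl, n_Pg, active_set):
--     '''
--     create index for \lambda and \nu
--     :param n_eq: the number of equality
--     :param nb: the number of buses
--     :param nl: the number of lines
--     :param n_Pg: the number of generators
--     :return: indexes for activated constraints
--     '''
--
--
--     act_Vmax = [True if i in active_set else False for i in range(n_eq, n_eq+nb-1)]
--
--     act_Vmin = [True if i in active_set else False for i in range(n_eq+nb-1, n_eq+2*nb-2)]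
--
--     act_f = [True if i in active_set else False for i in range(n_eq+2*nb-2, n_eq +2*nb-2+nl)]
--     act_t = [True if i in active_set else False for i in range(n_eq +2*nb-2+nl, n_eq +2*nb-2+2*nl)]
--
--     act_Pgmax = [True if i in active_set else False for i in range(n_eq +2*nb-2+2*nl, n_eq+2*nb-2+2*nl+n_Pg)]
--     act_Pgmin = [True if i in active_set else False for i in range(n_eq +2*nb-2+2*nl+n_Pg, n_eq  +2*nb-2+2*nl+2*n_Pg)]
--
--
--     return act_Vmax, act_Vmin, act_f, act_t, act_Pgmax, act_Pgmin
-- ===== SOURCE B (Python) =====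
-- def create_act_index(n_eq, nb, nl, n_Pg, active_set):
--     base = n_eq + 2 * nb - 2
--     groups = [(n_eq, nb - 1),
--               (n_eq + nb - 1, nb - 1),
--               (base, nl),
--               (base + nl, nl),
--               (base + 2 * nl, n_Pg),
--               (base + 2 * nl + n_Pg, n_Pg)]
--     masks = [[False] * max(length, 0) for _, length in groups]
--     for x in active_set:
--         for mask, (start, length) in zip(masks, groups):
--             if start <= x < start + length:
--                 mask[x - start] = True
--     return tuple(masks)
-- ===== Notes on version B (the rewrite author's own statement) =====
-- stated objective: alternative
-- what changed: Instead of six comprehensions that each scan active_set for every index of their range, B pre-sizes six False masks from the range boundaries and makes one pass over active_set, dispatching each element to its group and setting that single entry True.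
import Mathlib
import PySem

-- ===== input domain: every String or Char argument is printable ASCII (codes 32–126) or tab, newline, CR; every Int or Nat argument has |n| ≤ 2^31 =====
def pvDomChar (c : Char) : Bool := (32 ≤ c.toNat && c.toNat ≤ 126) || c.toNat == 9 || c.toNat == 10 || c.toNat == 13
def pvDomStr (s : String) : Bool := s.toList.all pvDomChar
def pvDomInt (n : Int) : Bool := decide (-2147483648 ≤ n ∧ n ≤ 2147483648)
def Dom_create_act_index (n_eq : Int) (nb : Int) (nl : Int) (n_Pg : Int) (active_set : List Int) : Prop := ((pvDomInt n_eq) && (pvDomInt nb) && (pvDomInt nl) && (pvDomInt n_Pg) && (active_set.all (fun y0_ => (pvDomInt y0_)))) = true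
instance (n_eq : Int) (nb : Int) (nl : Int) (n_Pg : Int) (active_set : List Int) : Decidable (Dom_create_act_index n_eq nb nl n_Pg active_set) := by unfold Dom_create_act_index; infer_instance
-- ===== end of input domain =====

-- B replaces A's six per-index membership scans over active_set by one pass over
-- active_set that scatters True into six pre-sized False masks (objective: alternative
-- algorithm; the inner membership scan disappears).


-- ===== PORT A =====
-- one list comprehension `[True if i in active_set else False for i in range(a, b)]`
def pvMemRange (active_set : List Int) (a b : Int) : List Bool :=
  (PySem.List.pyRange a b 1).map (fun i => if active_set.contains i then true else false)

def create_act_index (n_eq : Int) (nb : Int) (nl : Int) (n_Pg : Int) (active_set : List Int) : List (List Bool) :=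
  let act_Vmax := pvMemRange active_set n_eq (n_eq + nb - 1)
  let act_Vmin := pvMemRange active_set (n_eq + nb - 1) (n_eq + 2*nb - 2)
  let act_f := pvMemRange active_set (n_eq + 2*nb - 2) (n_eq + 2*nb - 2 + nl)
  let act_t := pvMemRange active_set (n_eq + 2*nb - 2 + nl) (n_eq + 2*nb - 2 + 2*nl)
  let act_Pgmax := pvMemRange active_set (n_eq + 2*nb - 2 + 2*nl) (n_eq + 2*nb - 2 + 2*nl + n_Pg)
  let act_Pgmin := pvMemRange active_set (n_eq + 2*nb - 2 + 2*nl + n_Pg) (n_eq + 2*nb - 2 + 2*nl + 2*n_Pg)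
  [act_Vmax, act_Vmin, act_f, act_t, act_Pgmax, act_Pgmin]

-- ===== PORT B =====
-- `if start <= x < start + length: mask[x - start] = True` for one (mask, (start, length)) pair
def pvStep (x : Int) (m : List Bool) (g : Int × Int) : List Bool :=
  if g.1 ≤ x ∧ x < g.1 + g.2 then m.set (x - g.1).toNat true else m

def create_act_index_alt (n_eq : Int) (nb : Int) (nl : Int) (n_Pg : Int) (active_set : List Int) : List (List Bool) :=
  let base := n_eq + 2*nb - 2
  let groups : List (Int × Int) :=
    [(n_eq, nb - 1), (n_eq + nb - 1, nb - 1), (base, nl), (base + nl, nl),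
     (base + 2*nl, n_Pg), (base + 2*nl + n_Pg, n_Pg)]
  let masks := groups.map (fun g => List.replicate (max g.2 0).toNat false)
  active_set.foldl (fun ms x => List.zipWith (fun m g => pvStep x m g) ms groups) masks

-- ===== PRECONDITION & SPEC =====
def Spec_create_act_index (n_eq : Int) (nb : Int) (nl : Int) (n_Pg : Int) (active_set : List Int) (out : List (List Bool)) : Prop := out = create_act_index_alt n_eq nb nl n_Pg active_set
instance (n_eq : Int) (nb : Int) (nl : Int) (n_Pg : Int) (active_set : List Int) (out : List (List Bool)) : Decidable (Spec_create_act_index n_eq nb nl n_Pg active_set out) := by unfold Spec_create_act_index; infer_instance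

-- ===== CLAIM (what is proved, stated in full; the proofs are below) =====
def Claim_equal_create_act_index : Prop := ∀ (n_eq : Int) (nb : Int) (nl : Int) (n_Pg : Int) (active_set : List Int), Dom_create_act_index n_eq nb nl n_Pg active_set → Spec_create_act_index n_eq nb nl n_Pg active_set (create_act_index n_eq nb nl n_Pg active_set)

-- ===== LEMMAS AND PROOFS =====

theorem pv_zipWith_map (x : Int) (groups : List (Int × Int)) (h : (Int × Int) → List Bool) :
    List.zipWith (fun m g => pvStep x m g) (groups.map h) groups
      = groups.map (fun g => pvStep x (h g) g) := by
  induction groups with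
  | nil => rfl
  | cons g gs ihg => simp [ihg]

-- the foldl over the zipWith of six masks decomposes into six independent foldls
theorem pv_foldl_zipWith (as : List Int) (groups : List (Int × Int))
    (h : (Int × Int) → List Bool) :
    as.foldl (fun ms x => List.zipWith (fun m g => pvStep x m g) ms groups) (groups.map h)
      = groups.map (fun g => as.foldl (fun m x => pvStep x m g) (h g)) := by
  induction as generalizing h with
  | nil => rfl
  | cons x as ih =>
    simp only [List.foldl_cons]
    rw [pv_zipWith_map x groups h]
    exact ih (fun g => pvStep x (h g) g)

theorem pv_scat_len (as : List Int) (g : Int × Int) (m0 : List Bool) :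
    (as.foldl (fun m x => pvStep x m g) m0).length = m0.length := by
  induction as generalizing m0 with
  | nil => rfl
  | cons x as ih =>
    simp only [List.foldl_cons]
    rw [ih]
    unfold pvStep
    split <;> simp

theorem pv_scat_get (as : List Int) (s L : Int) (m0 : List Bool) (j : Nat)
    (hj : j < (as.foldl (fun m x => pvStep x m (s, L)) m0).length) (hj0 : j < m0.length) :
    (as.foldl (fun m x => pvStep x m (s, L)) m0)[j]
      = (m0[j] || as.any (fun x => decide (x = s + (j:Int)) && decide ((j:Int) < L))) := by
  induction as generalizing m0 with
  | nil => simp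
  | cons x as ih =>
    simp only [List.foldl_cons, List.any_cons]
    have hlen : j < (pvStep x m0 (s, L)).length := by
      unfold pvStep; split <;> simp [hj0]
    rw [ih (pvStep x m0 (s, L)) (by rw [pv_scat_len]; exact hlen) hlen]
    have hstep : (pvStep x m0 (s, L))[j]'hlen
        = (m0[j] || (decide (x = s + (j:Int)) && decide ((j:Int) < L))) := by
      unfold pvStep
      split
      · next hc =>
        rw [List.getElem_set]
        split
        · next he =>
          have : x = s + (j:Int) ∧ (j:Int) < L := by
            constructor <;> omega
          simp [this.1, this.2]
        · next he =>
          have : ¬ (x = s + (j:Int)) := by omega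
          simp [this]
      · next hc =>
        have : ¬ (x = s + (j:Int)) ∨ ¬ ((j:Int) < L) := by omega
        rcases this with h | h <;> simp [h]
    rw [hstep, Bool.or_assoc]

theorem pv_pyRange_map (s : Int) (n : Nat) :
    PySem.List.pyRange s (s + n) 1 = (List.range n).map (fun j : Nat => s + (j:Int)) := by
  induction n generalizing s with
  | zero => simp [pysem]
  | succ n ih =>
    rw [PySem.List.pyRange_one_cons (by omega)]
    rw [show s + ((n:Nat)+1 : Nat) = (s+1) + (n:Int) by push_cast; ring]
    rw [ih (s+1), List.range_succ_eq_map]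
    simp only [List.map_cons, List.map_map, Nat.cast_zero, add_zero]
    congr 1
    apply List.map_congr_left; intro j _; simp [Function.comp]; ring

theorem pv_contains_any (as : List Int) (v : Int) :
    (as.contains v) = as.any (fun x => decide (x = v)) := by
  apply Bool.eq_iff_iff.mpr; simp

-- the scatter loop over one group equals A's membership comprehension over the same range
theorem pv_group (as : List Int) (s L : Int) :
    as.foldl (fun m x => pvStep x m (s, L)) (List.replicate (max L 0).toNat false)
      = pvMemRange as s (s + L) := by
  have hL : s + L = s + ((max L 0).toNat : Nat) ∨ L < 0 := by omega
  rcases hL with hL | hL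
  · unfold pvMemRange
    rw [hL, pv_pyRange_map]
    apply List.ext_getElem
    · simp [pv_scat_len]
    · intro j hj hj'
      have hjn : j < (max L 0).toNat := by
        rw [pv_scat_len, List.length_replicate] at hj; exact hj
      rw [pv_scat_get as s L _ j hj (by simpa using hjn)]
      have hjL : (j:Int) < L := by omega
      simp only [List.getElem_replicate, Bool.false_or, List.getElem_map,
        List.getElem_range]
      rw [pv_contains_any]
      simp only [hjL, decide_true, Bool.and_true]
      cases hc : as.any (fun x => decide (x = s + (j:Int))) <;> simp
  · have h1 : (max L 0).toNat = 0 := by omega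
    have h2 : PySem.List.pyRange s (s + L) 1 = [] := by
      have : s + L ≤ s := by omega
      simp [pysem, this]
    rw [h1]
    have h3 := pv_scat_len as (s, L) (List.replicate 0 false)
    simp only [List.replicate_zero, List.length_nil] at h3
    simp only [List.replicate_zero]
    rw [List.eq_nil_of_length_eq_zero h3]
    simp [pvMemRange, h2]

-- ===== VERDICT (by name: the statement is the Claim_ definition above) =====
theorem create_act_index_spec : Claim_equal_create_act_index := by
  intro n_eq nb nl n_Pg as _
  show create_act_index n_eq nb nl n_Pg as = create_act_index_alt n_eq nb nl n_Pg as
  simp only [create_act_index, create_act_index_alt]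
  rw [pv_foldl_zipWith]
  simp only [List.map_cons, List.map_nil, List.cons.injEq, and_true]
  refine ⟨?_, ?_, ?_, ?_, ?_, ?_⟩ <;>
    (rw [pv_group] <;> (congr 1 <;> try ring))
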